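-- pv_equiv track=rewrite | github.com/boyzcl/image2-design-director | scripts/publication_review_lib.py | collect_editorial_residues
-- ===== SOURCE A (Python) =====
-- def collect_editorial_residues(
--     cta_text: str | None = None,
--     date_text: str | None = None,
--     badge_text: str | None = None,
--     qr_image: str | None = None,
--     logo_image: str | None = None,
--     allowed_fixed_elements: list[str] | None = None,
--     extra_residues: list[str] | None = None,
-- ) -> list[str]:
--     allow = {str(item).strip().lower() for item in (allowed_fixed_elements or [])}
--     residues = list(extra_residues or [])
--     if cta_text and "cta" not in allow:
--         residues.append("cta_text")
--     if date_text and "date" not in allow: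
--         residues.append("date_text")
--     if badge_text and "badge" not in allow:
--         residues.append("badge_text")
--     if qr_image and "qr" not in allow and "qr_code" not in allow:
--         residues.append("qr_image")
--     if logo_image and "logo" not in allow and "primary_logo" not in allow:
--         residues.append("logo_image")
--     return sorted(set(residues))
-- ===== SOURCE B (Python) =====
-- _SUPPRESSORS = {
--     "cta": "cta_text",
--     "date": "date_text",
--     "badge": "badge_text",
--     "qr": "qr_image",
--     "qr_code": "qr_image",
--     "logo": "logo_image",
--     "primary_logo": "logo_image",
-- }
--
--
-- def collect_editorial_residues(
--     cta_text=None,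
--     date_text=None,
--     badge_text=None,
--     qr_image=None,
--     logo_image=None,
--     allowed_fixed_elements=None,
--     extra_residues=None,
-- ):
--     present = {
--         name
--         for value, name in (
--             (cta_text, "cta_text"),
--             (date_text, "date_text"),
--             (badge_text, "badge_text"),
--             (qr_image, "qr_image"),
--             (logo_image, "logo_image"),
--         )
--         if value
--     }
--     suppressed = {
--         _SUPPRESSORS[key]
--         for key in (str(item).strip().lower() for item in (allowed_fixed_elements or []))
--         if key in _SUPPRESSORS
--     }
--     return sorted((present - suppressed) | set(extra_residues or []))
-- ===== Notes on version B (the rewrite author's own statement) =====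
-- stated objective: alternative
-- what changed: Inverts the direction: instead of five conditional appends guarded by allowlist membership tests, B computes the set of present element names, derives a suppressed-name set by mapping the normalized allowlist through a reverse key->residue table, and returns sorted((present - suppressed) | set(extra_residues)) by pure set algebra.
import Mathlib
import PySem

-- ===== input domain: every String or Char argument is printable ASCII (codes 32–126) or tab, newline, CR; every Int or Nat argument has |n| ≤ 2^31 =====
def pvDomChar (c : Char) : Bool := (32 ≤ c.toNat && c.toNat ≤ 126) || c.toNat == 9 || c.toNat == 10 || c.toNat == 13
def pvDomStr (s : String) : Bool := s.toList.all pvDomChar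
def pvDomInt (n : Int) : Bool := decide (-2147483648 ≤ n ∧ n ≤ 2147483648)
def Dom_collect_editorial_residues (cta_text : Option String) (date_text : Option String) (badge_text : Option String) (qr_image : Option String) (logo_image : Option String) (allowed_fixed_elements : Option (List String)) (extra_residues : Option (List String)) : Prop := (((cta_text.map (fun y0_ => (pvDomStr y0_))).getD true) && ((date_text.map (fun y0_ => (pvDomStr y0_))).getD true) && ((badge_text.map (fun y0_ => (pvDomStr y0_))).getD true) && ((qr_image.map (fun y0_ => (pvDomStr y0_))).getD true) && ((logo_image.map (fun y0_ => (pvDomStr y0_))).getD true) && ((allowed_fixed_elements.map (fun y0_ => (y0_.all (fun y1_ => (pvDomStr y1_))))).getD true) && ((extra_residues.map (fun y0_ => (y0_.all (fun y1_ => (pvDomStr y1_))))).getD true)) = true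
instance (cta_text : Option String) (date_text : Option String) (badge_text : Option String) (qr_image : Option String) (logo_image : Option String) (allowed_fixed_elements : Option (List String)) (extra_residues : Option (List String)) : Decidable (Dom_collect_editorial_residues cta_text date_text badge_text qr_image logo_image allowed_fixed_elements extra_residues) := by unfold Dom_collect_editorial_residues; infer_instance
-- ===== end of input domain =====

-- B computes the result by set algebra (present names minus a suppressed-name set derived from the allowlist via a reverse table, unioned with extras) instead of A's five conditional appends; alternative decomposition, same cost.


-- ===== PORT A =====
def collect_editorial_residues (cta_text : Option String) (date_text : Option String) (badge_text : Option String) (qr_image : Option String) (logo_image : Option String) (allowed_fixed_elements : Option (List String)) (extra_residues : Option (List String)) : List String :=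
  let allow : PySem.Set String :=
    PySem.Set.ofList ((allowed_fixed_elements.getD []).map (fun item => PySem.Str.lower (PySem.Str.strip item)))
  let residues := extra_residues.getD []
  let residues := if cta_text.getD "" ≠ "" ∧ ¬ ("cta" ∈ allow) then residues ++ ["cta_text"] else residues
  let residues := if date_text.getD "" ≠ "" ∧ ¬ ("date" ∈ allow) then residues ++ ["date_text"] else residues
  let residues := if badge_text.getD "" ≠ "" ∧ ¬ ("badge" ∈ allow) then residues ++ ["badge_text"] else residues
  let residues := if qr_image.getD "" ≠ "" ∧ ¬ ("qr" ∈ allow) ∧ ¬ ("qr_code" ∈ allow) then residues ++ ["qr_image"] else residues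
  let residues := if logo_image.getD "" ≠ "" ∧ ¬ ("logo" ∈ allow) ∧ ¬ ("primary_logo" ∈ allow) then residues ++ ["logo_image"] else residues
  PySem.List.sorted (PySem.Set.ofList residues) (fun x => x) false

-- ===== PORT B =====
-- the reverse table _SUPPRESSORS: allowlist key → residue name it suppresses
def pvSuppressorMap : PySem.Dict String String :=
  PySem.Dict.ofList [("cta", "cta_text"), ("date", "date_text"), ("badge", "badge_text"),
   ("qr", "qr_image"), ("qr_code", "qr_image"),
   ("logo", "logo_image"), ("primary_logo", "logo_image")]

def collect_editorial_residues_alt (cta_text : Option String) (date_text : Option String) (badge_text : Option String) (qr_image : Option String) (logo_image : Option String) (allowed_fixed_elements : Option (List String)) (extra_residues : Option (List String)) : List String :=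
  let present : PySem.Set String :=
    PySem.Set.ofList
      ([(cta_text, "cta_text"), (date_text, "date_text"), (badge_text, "badge_text"),
        (qr_image, "qr_image"), (logo_image, "logo_image")].filterMap
        (fun p => if p.1.getD "" ≠ "" then some p.2 else none))
  let suppressed : PySem.Set String :=
    PySem.Set.ofList
      (((allowed_fixed_elements.getD []).map (fun item => PySem.Str.lower (PySem.Str.strip item))).filterMap
        (fun key => PySem.Dict.get? pvSuppressorMap key))
  PySem.List.sorted (PySem.Set.union (PySem.Set.diff present suppressed) (extra_residues.getD [])) (fun x => x) false

-- ===== PRECONDITION & SPEC =====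
def Spec_collect_editorial_residues (cta_text : Option String) (date_text : Option String) (badge_text : Option String) (qr_image : Option String) (logo_image : Option String) (allowed_fixed_elements : Option (List String)) (extra_residues : Option (List String)) (out : List String) : Prop := out = collect_editorial_residues_alt cta_text date_text badge_text qr_image logo_image allowed_fixed_elements extra_residues
instance (cta_text : Option String) (date_text : Option String) (badge_text : Option String) (qr_image : Option String) (logo_image : Option String) (allowed_fixed_elements : Option (List String)) (extra_residues : Option (List String)) (out : List String) : Decidable (Spec_collect_editorial_residues cta_text date_text badge_text qr_image logo_image allowed_fixed_elements extra_residues out) := by unfold Spec_collect_editorial_residues; infer_instance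

-- ===== CLAIM (what is proved, stated in full; the proofs are below) =====
def Claim_equal_collect_editorial_residues : Prop := ∀ (cta_text : Option String) (date_text : Option String) (badge_text : Option String) (qr_image : Option String) (logo_image : Option String) (allowed_fixed_elements : Option (List String)) (extra_residues : Option (List String)), Dom_collect_editorial_residues cta_text date_text badge_text qr_image logo_image allowed_fixed_elements extra_residues → Spec_collect_editorial_residues cta_text date_text badge_text qr_image logo_image allowed_fixed_elements extra_residues (collect_editorial_residues cta_text date_text badge_text qr_image logo_image allowed_fixed_elements extra_residues)

-- ===== LEMMAS AND PROOFS =====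

-- ===== VERDICT (by name: the statement is the Claim_ definition above) =====
lemma supp_get (k : String) :
    PySem.Dict.get? pvSuppressorMap k =
      (if k = "cta" then some "cta_text" else if k = "date" then some "date_text"
       else if k = "badge" then some "badge_text" else if k = "qr" then some "qr_image"
       else if k = "qr_code" then some "qr_image" else if k = "logo" then some "logo_image"
       else if k = "primary_logo" then some "logo_image" else none) := by
  have h : pvSuppressorMap = PySem.Dict.mk
      [("cta", "cta_text"), ("date", "date_text"), ("badge", "badge_text"),
       ("qr", "qr_image"), ("qr_code", "qr_image"),
       ("logo", "logo_image"), ("primary_logo", "logo_image")] := by decide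
  rw [h]
  simp only [PySem.Dict.get?_mk_cons, beq_iff_eq]
  by_cases h1 : k = "cta" <;> by_cases h2 : k = "date" <;> by_cases h3 : k = "badge" <;>
    by_cases h4 : k = "qr" <;> by_cases h5 : k = "qr_code" <;> by_cases h6 : k = "logo" <;>
    by_cases h7 : k = "primary_logo" <;>
    simp_all [PySem.Dict.get?, @eq_comm String]

-- glue: two nodup lists with the same members have the same sorted(set) output
lemma sorted_eq_of_same_mem (xs ys : List String) (h1 : xs.Nodup) (h2 : ys.Nodup)
    (h : ∀ a, a ∈ xs ↔ a ∈ ys) :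
    PySem.List.sorted xs (fun x => x) false = PySem.List.sorted ys (fun x => x) false :=
  PySem.List.sorted_eq_sorted_of_perm _ _ (fun x : String => x) (fun _ _ hh => hh)
    ((List.perm_ext_iff_of_nodup h1 h2).2 h)

-- membership through one conditional append of A's loop body
lemma mem_ite_append (c : Prop) [Decidable c] (l : List String) (y x : String) :
    (x ∈ (if c then l ++ [y] else l)) ↔ x ∈ l ∨ (c ∧ x = y) := by
  split_ifs <;> simp_all

-- membership in B's suppressed-name set, characterised over the normalized allowlist M
lemma supp_mem (M : List String) (x : String) :
    (∃ k ∈ M, PySem.Dict.get? pvSuppressorMap k = some x)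
    ↔ (x = "cta_text" ∧ "cta" ∈ M) ∨ (x = "date_text" ∧ "date" ∈ M)
      ∨ (x = "badge_text" ∧ "badge" ∈ M)
      ∨ (x = "qr_image" ∧ ("qr" ∈ M ∨ "qr_code" ∈ M))
      ∨ (x = "logo_image" ∧ ("logo" ∈ M ∨ "primary_logo" ∈ M)) := by
  constructor
  · rintro ⟨k, hk, hg⟩
    rw [supp_get] at hg
    split_ifs at hg <;> simp_all
  · rintro (⟨rfl, h⟩ | ⟨rfl, h⟩ | ⟨rfl, h⟩ | ⟨rfl, h | h⟩ | ⟨rfl, h | h⟩)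
    · exact ⟨"cta", h, by decide⟩
    · exact ⟨"date", h, by decide⟩
    · exact ⟨"badge", h, by decide⟩
    · exact ⟨"qr", h, by decide⟩
    · exact ⟨"qr_code", h, by decide⟩
    · exact ⟨"logo", h, by decide⟩
    · exact ⟨"primary_logo", h, by decide⟩

-- the value of one filterMap test of B's present-set builder
lemma ite_some_eq_some (c : Prop) [Decidable c] (n x : String) :
    ((if c then some n else none) = some x) ↔ c ∧ n = x := by
  split_ifs <;> simp_all

set_option maxHeartbeats 1000000 in
theorem collect_editorial_residues_spec : Claim_equal_collect_editorial_residues := by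
  intro cta_text date_text badge_text qr_image logo_image allowed_fixed_elements extra_residues _
  simp only [Spec_collect_editorial_residues, collect_editorial_residues, collect_editorial_residues_alt]
  apply sorted_eq_of_same_mem _ _ (PySem.Set.nodup_ofList _)
    (PySem.Set.nodup_union _ _ (PySem.Set.nodup_diff _ _ (PySem.Set.nodup_ofList _)))
  intro x
  simp only [PySem.Set.mem_union, PySem.Set.mem_diff, PySem.Set.mem_ofList, List.mem_filterMap,
    mem_ite_append, supp_mem, ite_some_eq_some, List.mem_cons, List.not_mem_nil]
  by_cases hx1 : x = "cta_text" <;> by_cases hx2 : x = "date_text" <;>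
    by_cases hx3 : x = "badge_text" <;> by_cases hx4 : x = "qr_image" <;>
    by_cases hx5 : x = "logo_image" <;>
    simp_all <;> tauto
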